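-- pv_equiv track=rewrite | github.com/dplocki/aquaQ-challenge | solutions/challenge05.py | solution
-- ===== SOURCE A (Python) =====
-- def rotate(dice: list[str], direction: str) -> list[str]:
--     if direction in "UD":
--         dice[0], dice[2] = dice[2], dice[0]
--     elif direction in "LR":
--         dice[0], dice[1] = dice[1], dice[0]
--
--     return dice
--
-- def solution(instruction: str) -> int:
--     # Front, Left, Top
--     dice1 = [1, 2, 3]
--     dice2 = [1, 3, 2]
--     result = 0
--
--     for index, direction in enumerate(instruction):
--         dice1 = rotate(dice1, direction)
--         dice2 = rotate(dice2, direction)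
--
--         if dice1[0] == dice2[0]:
--             result += index
--
--     return result
-- ===== SOURCE B (Python) =====
-- def solution(instruction: str) -> int:
--     # Track only pos = position (0=front, 1=left, 2=top) of the face value 1;
--     # the two dice differ by relabelling 2<->3, so their fronts match iff pos == 0.
--     pos = 0
--     result = 0
--     for index, direction in enumerate(instruction):
--         if direction in "UD":
--             pos = 2 - pos if pos != 1 else 1
--         elif direction in "LR":
--             pos = 1 - pos if pos != 2 else 2
--         if pos == 0:
--             result += index
--     return result
-- ===== Notes on version B (the rewrite author's own statement) =====
-- stated objective: simpler
-- what changed: Replaces the two simulated 3-face dice (lists mutated by swaps) with a single integer tracking the position of face value 1, using that the two dice differ only by the relabelling 2<->3, so their fronts match exactly when that position is 0; one integer update per character instead of two list rebuilds.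
import Mathlib
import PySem

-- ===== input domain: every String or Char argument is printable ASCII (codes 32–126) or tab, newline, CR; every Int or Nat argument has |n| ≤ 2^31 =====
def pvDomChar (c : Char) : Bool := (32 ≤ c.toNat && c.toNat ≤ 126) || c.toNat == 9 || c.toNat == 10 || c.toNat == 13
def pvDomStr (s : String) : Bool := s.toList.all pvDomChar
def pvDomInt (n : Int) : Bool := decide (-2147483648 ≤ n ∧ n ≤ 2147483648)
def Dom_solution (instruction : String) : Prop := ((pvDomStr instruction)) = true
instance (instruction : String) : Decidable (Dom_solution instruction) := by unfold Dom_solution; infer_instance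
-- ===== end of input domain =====

-- B keeps only the position of face value 1 instead of two dice lists; same return value.

-- ===== PORT A =====
-- 'direction in "UD"' on the single characters of the string is d = 'U' ∨ d = 'D' (exact).
def rotate (dice : List Int) (direction : Char) : List Int :=
  if direction = 'U' ∨ direction = 'D' then
    match dice with
    | a :: b :: c :: rest => c :: b :: a :: rest
    | l => l
  else if direction = 'L' ∨ direction = 'R' then
    match dice with
    | a :: b :: rest => b :: a :: rest
    | l => l
  else dice

def solutionStep (st : List Int × List Int × Int) (p : Int × Char) : List Int × List Int × Int :=
  let dice1 := rotate st.1 p.2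
  let dice2 := rotate st.2.1 p.2
  (dice1, dice2,
    if PySem.List.pyGet? dice1 0 = PySem.List.pyGet? dice2 0 then st.2.2 + p.1 else st.2.2)

def solution (instruction : String) : Int :=
  ((PySem.List.enumerate instruction.toList 0).foldl solutionStep
    ([1, 2, 3], [1, 3, 2], 0)).2.2

-- ===== PORT B =====
def solutionAltStep (st : Int × Int) (p : Int × Char) : Int × Int :=
  let pos :=
    if p.2 = 'U' ∨ p.2 = 'D' then (if st.1 ≠ 1 then 2 - st.1 else 1)
    else if p.2 = 'L' ∨ p.2 = 'R' then (if st.1 ≠ 2 then 1 - st.1 else 2)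
    else st.1
  (pos, if pos = 0 then st.2 + p.1 else st.2)

def solution_alt (instruction : String) : Int :=
  ((PySem.List.enumerate instruction.toList 0).foldl solutionAltStep (0, 0)).2

-- ===== PRECONDITION & SPEC =====
def Spec_solution (instruction : String) (out : Int) : Prop := out = solution_alt instruction
instance (instruction : String) (out : Int) : Decidable (Spec_solution instruction out) := by unfold Spec_solution; infer_instance

-- ===== CLAIM (what is proved, stated in full; the proofs are below) =====
def Claim_equal_solution : Prop := ∀ (instruction : String), Dom_solution instruction → Spec_solution instruction (solution instruction)

-- ===== LEMMAS AND PROOFS =====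

-- The six reachable joint states of (dice1, dice2, pos-of-1-in-dice1).
def DiceInv (d1 d2 : List Int) (pos : Int) : Prop :=
  (d1, d2, pos) = ([1,2,3], [1,3,2], 0) ∨
  (d1, d2, pos) = ([3,2,1], [2,3,1], 2) ∨
  (d1, d2, pos) = ([2,1,3], [3,1,2], 1) ∨
  (d1, d2, pos) = ([2,3,1], [3,2,1], 2) ∨
  (d1, d2, pos) = ([3,1,2], [2,1,3], 1) ∨
  (d1, d2, pos) = ([1,3,2], [1,2,3], 0)

theorem foldl_agree (l : List Char) (i : Int) (d1 d2 : List Int) (pos r : Int)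
    (h : DiceInv d1 d2 pos) :
    ((PySem.List.enumerate l i).foldl solutionStep (d1, d2, r)).2.2 =
    ((PySem.List.enumerate l i).foldl solutionAltStep (pos, r)).2 := by
  induction l generalizing i d1 d2 pos r with
  | nil => simp [PySem.List.enumerate_nil]
  | cons c l ih =>
    rw [PySem.List.enumerate_cons]
    simp only [List.foldl_cons]
    rcases h with h | h | h | h | h | h <;>
      (injection h with h1 h; injection h with h2 h3; subst h1; subst h2; subst h3) <;>
      by_cases hud : c = 'U' ∨ c = 'D' <;>
      by_cases hlr : c = 'L' ∨ c = 'R' <;>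
      · simp only [solutionStep, solutionAltStep, rotate, hud, hlr, if_true, if_false,
          ite_true, ite_false, PySem.List.pyGet?]
        norm_num
        exact ih _ _ _ _ _ (by unfold DiceInv; norm_num)

-- ===== VERDICT (by name: the statement is the Claim_ definition above) =====
theorem solution_spec : Claim_equal_solution := by
  intro instruction _
  unfold Spec_solution solution solution_alt
  exact foldl_agree _ _ _ _ _ _ (Or.inl rfl)
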